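-- pv_equiv track=rewrite | github.com/mirunadragunoi/LFA-LABS | CFG/cfg.py | parse_production
-- ===== SOURCE A (Python) =====
-- def parse_production(production):
--     """ analizarea unui sir de productie in simboluri individuale"""
--     symbols = []
--     i = 0
--     while i < len(production):
--         if production[i].isupper():
--             symbol = production[i]
--             j = i + 1
--             while j < len(production) and (production[j].isalnum() or production[j] == "'"):
--                 symbol += production[j]
--                 j += 1
--             symbols.append(symbol)
--             i = j
--         else:
--             symbols.append(production[i])
--             i += 1
--     return symbols
-- ===== SOURCE B (Python) =====
-- def parse_production(production):
--     """Single-pass state machine: one flat loop with a pending-symbol accumulator."""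
--     symbols = []
--     acc = ""
--     building = False
--     for ch in production:
--         if building and (ch.isalnum() or ch == "'"):
--             acc += ch
--         else:
--             if acc:
--                 symbols.append(acc)
--             if ch.isupper():
--                 acc = ch
--                 building = True
--             else:
--                 symbols.append(ch)
--                 acc = ""
--                 building = False
--     if acc:
--         symbols.append(acc)
--     return symbols
-- ===== Notes on version B (the rewrite author's own statement) =====
-- stated objective: alternative
-- what changed: Replaced A's nested index-driven while-loops (inner loop extends each uppercase-started symbol via repeated indexing) with a single flat pass over the characters maintaining a pending-symbol accumulator and a building flag, flushed after the loop.
import Mathlib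
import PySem

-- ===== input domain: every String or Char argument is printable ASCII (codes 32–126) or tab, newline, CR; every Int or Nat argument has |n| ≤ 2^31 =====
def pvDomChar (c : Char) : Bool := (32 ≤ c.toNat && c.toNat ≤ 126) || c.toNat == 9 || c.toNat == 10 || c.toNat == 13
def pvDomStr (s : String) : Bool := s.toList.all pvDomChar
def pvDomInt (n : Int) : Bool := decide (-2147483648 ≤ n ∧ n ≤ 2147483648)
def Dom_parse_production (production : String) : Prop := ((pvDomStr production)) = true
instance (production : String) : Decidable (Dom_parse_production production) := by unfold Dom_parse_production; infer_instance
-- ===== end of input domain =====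

-- B replaces A's nested outer/inner while-loops with one flat fold over the characters
-- carrying a pending-symbol accumulator (objective: alternative decomposition; same O(n) cost).

-- ===== PORT A =====
-- inner while-loop of A: extend `symbol` while the next char is alphanumeric or an apostrophe
def pvTakeA (symbol : String) (cs : List Char) : String × List Char :=
  match cs with
  | [] => (symbol, [])
  | c :: rest =>
    if c.isAlphanum || c == '\'' then pvTakeA (symbol.push c) rest
    else (symbol, c :: rest)

theorem pvTakeA_len (symbol : String) (cs : List Char) : (pvTakeA symbol cs).2.length ≤ cs.length := by
  induction cs generalizing symbol with
  | nil => simp [pvTakeA]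
  | cons c rest ih =>
    simp only [pvTakeA]
    split
    · exact Nat.le_trans (ih _) (Nat.le_succ _)
    · simp

-- outer while-loop of A, as structural recursion over the remaining characters
def pvGoA (cs : List Char) : List String :=
  match cs with
  | [] => []
  | c :: rest =>
    if c.isUpper then
      let p := pvTakeA (String.ofList [c]) rest
      p.1 :: pvGoA p.2
    else
      String.ofList [c] :: pvGoA rest
termination_by cs.length
decreasing_by
  · exact Nat.lt_succ_of_le (pvTakeA_len _ _)
  · simp

def parse_production (production : String) : List String := pvGoA production.toList

-- ===== PORT B =====
-- one step of B's flat loop over state (symbols so far, accumulator, building flag)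
def pvStepB (st : List String × String × Bool) (c : Char) : List String × String × Bool :=
  let (res, acc, building) := st
  if building && (c.isAlphanum || c == '\'') then (res, acc.push c, building)
  else
    let res' := if acc ≠ "" then res ++ [acc] else res
    if c.isUpper then (res', String.ofList [c], true)
    else (res' ++ [String.ofList [c]], "", false)

-- final flush after the loop
def pvFinishB (st : List String × String × Bool) : List String :=
  let (res, acc, _) := st
  if acc ≠ "" then res ++ [acc] else res

def parse_production_alt (production : String) : List String :=
  pvFinishB (production.toList.foldl pvStepB ([], "", false))

-- ===== PRECONDITION & SPEC =====
def Spec_parse_production (production : String) (out : List String) : Prop := out = parse_production_alt production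
instance (production : String) (out : List String) : Decidable (Spec_parse_production production out) := by unfold Spec_parse_production; infer_instance

-- ===== CLAIM (what is proved, stated in full; the proofs are below) =====
def Claim_equal_parse_production : Prop := ∀ (production : String), Dom_parse_production production → Spec_parse_production production (parse_production production)

-- ===== LEMMAS AND PROOFS =====

theorem pv_upper_alnum {c : Char} (h : c.isUpper = true) : c.isAlphanum = true := by
  simp [Char.isAlphanum, Char.isAlpha, h]

-- combined invariant, by strong induction on the remaining length:
-- (neutral state) the fold from (res, "", false) produces res ++ pvGoA cs, and
-- (building state) the fold from (res, acc, true) with acc ≠ "" first finishes acc via pvTakeA.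
theorem pv_invariant (n : ℕ) :
    ∀ cs : List Char, cs.length ≤ n →
      (∀ res : List String,
        pvFinishB (cs.foldl pvStepB (res, "", false)) = res ++ pvGoA cs) ∧
      (∀ (res : List String) (acc : String), acc ≠ "" →
        pvFinishB (cs.foldl pvStepB (res, acc, true)) =
          res ++ (pvTakeA acc cs).1 :: pvGoA (pvTakeA acc cs).2) := by
  induction n with
  | zero =>
    intro cs hlen
    have hnil : cs = [] := List.eq_nil_of_length_eq_zero (Nat.le_zero.mp hlen)
    subst hnil
    constructor
    · intro res; simp [pvFinishB, pvGoA]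
    · intro res acc hacc; simp [pvFinishB, pvTakeA, pvGoA, hacc]
  | succ n ih =>
    intro cs hlen
    match cs with
    | [] =>
      constructor
      · intro res; simp [pvFinishB, pvGoA]
      · intro res acc hacc; simp [pvFinishB, pvTakeA, pvGoA, hacc]
    | c :: rest =>
      have hrest : rest.length ≤ n := Nat.lt_succ_iff.mp (by simpa using hlen)
      constructor
      · intro res
        by_cases hu : c.isUpper = true
        · have hstep : pvStepB (res, "", false) c = (res, String.ofList [c], true) := by
            simp [pvStepB, hu]
          have hne : String.ofList [c] ≠ "" := by
            intro h
            have := congrArg String.toList h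
            simp [String.toList_ofList] at this
          rw [List.foldl_cons, hstep, (ih rest hrest).2 res _ hne]
          simp [pvGoA, hu]
        · have hu' : c.isUpper = false := by
            cases hv : c.isUpper
            · rfl
            · exact absurd hv hu
          have hstep : pvStepB (res, "", false) c = (res ++ [String.ofList [c]], "", false) := by
            simp [pvStepB, hu']
          rw [List.foldl_cons, hstep, (ih rest hrest).1]
          simp [pvGoA, hu']
      · intro res acc hacc
        by_cases hc : (c.isAlphanum || c == '\'') = true
        · have hstep : pvStepB (res, acc, true) c = (res, acc.push c, true) := by
            simp [pvStepB, hc]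
          have hne : acc.push c ≠ "" := by
            intro h
            have := congrArg String.toList h
            simp [String.toList_push] at this
          rw [List.foldl_cons, hstep, (ih rest hrest).2 res _ hne]
          simp [pvTakeA, hc]
        · have hc' : (c.isAlphanum || c == '\'') = false := by
            cases hv : (c.isAlphanum || c == '\'')
            · rfl
            · exact absurd hv hc
          have hu' : c.isUpper = false := by
            cases hv : c.isUpper
            · rfl
            · exact absurd (by simp [pv_upper_alnum hv]) hc
          have hstep : pvStepB (res, acc, true) c = (res ++ [acc] ++ [String.ofList [c]], "", false) := by
            simp [pvStepB, hc', hu', hacc]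
          rw [List.foldl_cons, hstep, (ih rest hrest).1]
          simp [pvTakeA, pvGoA, hc', hu']

-- ===== VERDICT (by name: the statement is the Claim_ definition above) =====
theorem parse_production_spec : Claim_equal_parse_production := by
  intro production _
  unfold Spec_parse_production parse_production parse_production_alt
  have h := (pv_invariant production.toList.length production.toList le_rfl).1 []
  simpa using h.symm
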